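-- pv_equiv track=rewrite | github.com/coencoensmeets/usdGLBConverter | src/robotusd/robot_analysis.py | _find_common_base_joints
-- ===== SOURCE A (Python) =====
-- from typing import List, Tuple, Optional, Dict, Any
--
-- def _find_common_base_joints(gripper_chains: List[Dict[str, Any]]) -> List[str]:
-- 	"""Find common base joints across gripper chains."""
-- 	if not gripper_chains:
-- 		return []
--
-- 	# Start with the first chain's joints
-- 	common_joints = gripper_chains[0]['joint_names'][:]
--
-- 	# Find intersection with all other chains
-- 	for chain in gripper_chains[1:]:
-- 		new_common = []
-- 		for i, (j1, j2) in enumerate(zip(common_joints, chain['joint_names'])):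
-- 			if j1 == j2:
-- 				new_common.append(j1)
-- 			else:
-- 				break
-- 		common_joints = new_common
--
-- 	return common_joints
-- ===== SOURCE B (Python) =====
-- def _find_common_base_joints(gripper_chains):
-- 	"""Find common base joints across gripper chains (column-wise scan)."""
-- 	if not gripper_chains:
-- 		return []
-- 	joint_lists = [chain['joint_names'] for chain in gripper_chains]
-- 	common = []
-- 	for names in zip(*joint_lists):
-- 		if all(n == names[0] for n in names):
-- 			common.append(names[0])
-- 		else:
-- 			break
-- 	return common
-- ===== Notes on version B (the rewrite author's own statement) =====
-- stated objective: alternative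
-- what changed: Replaces the sequential pairwise reduction (intersecting the running common prefix with each chain) by a single column-wise scan over zip(*joint_lists) that stops at the first position where not all chains agree.
import Mathlib
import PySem

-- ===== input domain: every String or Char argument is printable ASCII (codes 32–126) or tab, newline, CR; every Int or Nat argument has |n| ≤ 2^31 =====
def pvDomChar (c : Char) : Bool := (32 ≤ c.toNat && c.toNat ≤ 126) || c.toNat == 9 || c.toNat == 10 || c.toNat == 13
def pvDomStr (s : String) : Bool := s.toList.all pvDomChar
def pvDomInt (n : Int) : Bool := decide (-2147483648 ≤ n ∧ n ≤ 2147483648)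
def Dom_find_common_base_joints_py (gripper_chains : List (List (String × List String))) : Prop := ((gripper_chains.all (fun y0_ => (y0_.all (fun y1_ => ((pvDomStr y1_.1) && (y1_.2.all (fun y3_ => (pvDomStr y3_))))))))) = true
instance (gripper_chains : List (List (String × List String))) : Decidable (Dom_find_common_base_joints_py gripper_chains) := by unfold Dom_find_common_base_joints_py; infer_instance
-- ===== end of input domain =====

-- B replaces A's sequential pairwise prefix-intersection by one column-wise scan
-- (zip of all joint lists, stop at the first disagreeing column); same cost, different decomposition.

-- chain['joint_names'] on the assoc-list encoding: first pair with that key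
-- (Pre_ guarantees the key is present, so the .getD [] default is never used inside Pre_).
def pvJN (chain : List (String × List String)) : List String :=
  (((chain.find? (fun p => p.1 == "joint_names")).map (·.2)).getD [])

-- ===== PORT A =====
-- inner loop: for (j1, j2) in zip(common, other): append j1 while equal, else break
def pvAInner : List String → List String → List String
  | j1 :: t1, j2 :: t2 => if j1 = j2 then j1 :: pvAInner t1 t2 else []
  | _, _ => []

def find_common_base_joints_py (gripper_chains : List (List (String × List String))) : List String :=
  match gripper_chains with
  | [] => []
  | c0 :: rest => rest.foldl (fun common chain => pvAInner common (pvJN chain)) (pvJN c0)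

-- ===== PORT B =====
-- 'for names in zip(*joint_lists): if all equal append names[0] else break' as one recursion over the columns
def pvBScan (lists : List (List String)) : List String :=
  match lists with
  | [] => []
  | l0 :: rest =>
    if l0.isEmpty || rest.any (·.isEmpty) then []
    else if rest.all (fun l => l.headI == l0.headI)
      then l0.headI :: pvBScan (l0.tail :: rest.map List.tail)
      else []
termination_by lists.headI.length
decreasing_by
  simp_all [List.isEmpty_iff]
  cases l0 <;> simp_all

def find_common_base_joints_py_alt (gripper_chains : List (List (String × List String))) : List String :=
  match gripper_chains with
  | [] => []
  | _ :: _ => pvBScan (gripper_chains.map pvJN)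

-- ===== PRECONDITION & SPEC =====
-- Pre_: every chain contains the key 'joint_names'; on a chain without it both Pythons raise KeyError.
def Pre_find_common_base_joints_py (gripper_chains : List (List (String × List String))) : Prop :=
  ∀ c ∈ gripper_chains, (c.find? (fun p => p.1 == "joint_names")).isSome

instance (gripper_chains : List (List (String × List String))) : Decidable (Pre_find_common_base_joints_py gripper_chains) := by unfold Pre_find_common_base_joints_py; infer_instance

def pvWitness_find_common_base_joints_py : (List (List (String × List String))) :=
  [[("joint_names", ["a", "b"])], [("joint_names", ["a", "c"])]]

def Spec_find_common_base_joints_py (gripper_chains : List (List (String × List String))) (out : List String) : Prop := out = find_common_base_joints_py_alt gripper_chains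
instance (gripper_chains : List (List (String × List String))) (out : List String) : Decidable (Spec_find_common_base_joints_py gripper_chains out) := by unfold Spec_find_common_base_joints_py; infer_instance

-- ===== CLAIM (what is proved, stated in full; the proofs are below) =====
def Claim_equal_find_common_base_joints_py : Prop := ∀ (gripper_chains : List (List (String × List String))), Dom_find_common_base_joints_py gripper_chains → Pre_find_common_base_joints_py gripper_chains → Spec_find_common_base_joints_py gripper_chains (find_common_base_joints_py gripper_chains)

-- ===== LEMMAS AND PROOFS =====

-- 'l is nonempty with head x', the condition threaded through both loop characterisations
def pvHd (x : String) (l : List String) : Bool := !l.isEmpty && (l.headI == x)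

lemma pvAInner_nil_left (l : List String) : pvAInner [] l = [] := by
  cases l <;> simp [pvAInner]

lemma foldl_pvAInner_nil (ls : List (List String)) : ls.foldl pvAInner [] = [] := by
  induction ls with
  | nil => rfl
  | cons l ls ih => simp [pvAInner_nil_left, ih]

lemma foldl_pvAInner_cons (x : String) (t : List String) (ls : List (List String)) :
    ls.foldl pvAInner (x :: t) =
      if ls.all (pvHd x)
      then x :: (ls.map List.tail).foldl pvAInner t
      else [] := by
  induction ls generalizing t with
  | nil => simp
  | cons l ls ih =>
    cases l with
    | nil => simp [pvAInner, foldl_pvAInner_nil, pvHd]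
    | cons y t' =>
      by_cases hxy : x = y
      · subst hxy
        have h1 : pvAInner (x :: t) (x :: t') = x :: pvAInner t t' := by simp [pvAInner]
        rw [List.foldl_cons, h1, ih]
        have h2 : pvHd x (x :: t') = true := by simp [pvHd, List.headI]
        simp [h2, List.foldl_cons]
      · have hyx : (y == x) = false := beq_eq_false_iff_ne.mpr (fun h => hxy h.symm)
        have h1 : pvAInner (x :: t) (y :: t') = [] := by simp [pvAInner, hxy]
        have h2 : pvHd x (y :: t') = false := by simp [pvHd, List.headI, hyx]
        rw [List.foldl_cons, h1, foldl_pvAInner_nil]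
        simp [h2]

lemma main_lemma (l0 : List String) (ls : List (List String)) :
    ls.foldl pvAInner l0 = pvBScan (l0 :: ls) := by
  induction l0 generalizing ls with
  | nil =>
    rw [foldl_pvAInner_nil, pvBScan]
    simp
  | cons x t ih =>
    rw [foldl_pvAInner_cons]
    conv_rhs => rw [pvBScan]
    simp only [List.isEmpty_cons, Bool.false_or, List.headI_cons, List.tail_cons]
    by_cases hA : ls.all (pvHd x) = true
    · have hmem := List.all_eq_true.mp hA
      have hne : (ls.any fun l => l.isEmpty) = false := by
        rw [List.any_eq_false]
        intro l hl
        have h := hmem l hl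
        simp only [pvHd, Bool.and_eq_true, Bool.not_eq_eq_eq_not, Bool.not_true] at h
        simp [h.1]
      have hall : (ls.all fun l => l.headI == x) = true := by
        rw [List.all_eq_true]
        intro l hl
        have h := hmem l hl
        simp only [pvHd, Bool.and_eq_true] at h
        exact h.2
      rw [if_pos hA, hne, hall]
      simp [ih]
    · rw [if_neg hA]
      by_cases hne : (ls.any fun l => l.isEmpty) = true
      · rw [hne]
        simp
      · have hne' : (ls.any fun l => l.isEmpty) = false := Bool.eq_false_iff.mpr hne
        have hall : (ls.all fun l => l.headI == x) = false := by
          rw [Bool.eq_false_iff]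
          intro hall
          apply hA
          rw [List.all_eq_true]
          intro l hl
          have h1 := List.all_eq_true.mp hall l hl
          have h2 := List.any_eq_false.mp hne' l hl
          simp [pvHd, h1, h2]
        rw [hne', hall]
        simp

-- ===== VERDICT (by name: the statement is the Claim_ definition above) =====
theorem find_common_base_joints_py_spec : Claim_equal_find_common_base_joints_py := by
  intro gc _ _
  unfold Spec_find_common_base_joints_py find_common_base_joints_py find_common_base_joints_py_alt
  cases gc with
  | nil => rfl
  | cons c0 rest =>
    simp only [List.map_cons]
    rw [← main_lemma, ← List.foldl_map]
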